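-- pv_equiv track=rewrite | github.com/salmaz-ibrahim/task-scheduler-csp | scheduler.py | solve_schedule
-- ===== SOURCE A (Python) =====
-- import itertools
--
-- time_domains = ["Morning", "Afternoon", "Evening", "Night"]
--
-- def solve_schedule(input_string):
--     #Define tasks by asking user input
--     tasks = input_string.split(",")  # Split input by commas
--     tasks = [task.strip() for task in tasks if task.strip() != ""]  # Remove any extra whitespace, and ignore empty tasks
--
--     if not tasks: #In case of empty input, exit()
--         return "❌ Please enter at least one valid task"
--
--     #Handle duplicate tasks
--     if len(set(tasks)) != len(tasks):
--         return "⚠️ Duplicate tasks detected. Please ensure all tasks are unique."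
--
--     #Check if there are enough time slots for the tasks
--     if len(tasks) > len(time_domains):
--         return "❌ Not enough time slots for tasks"
--
--     #Generate assignments
--     all_assignments = itertools.product(time_domains, repeat=len(tasks))
--
--     for assignment in all_assignments:
--         #Rule, enforce 1 task per time slot
--         if len(set(assignment)) == len(assignment):
--             task_map = dict(zip(tasks, assignment))
--             formatted = "\n".join([f"{task}: {slot}" for task, slot in task_map.items()])
--             return f"✅ Valid Schedule:\n{formatted}"
--
--     return "❌ No valid schedule found. Please adjust your tasks or time slots."
-- ===== SOURCE B (Python) =====
-- time_domains = ["Morning", "Afternoon", "Evening", "Night"]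
--
-- def solve_schedule(input_string):
--     # Directly pair tasks with the first time slots instead of searching itertools.product:
--     # the lexicographically-first all-distinct assignment is exactly time_domains[:len(tasks)].
--     tasks = [t for t in (s.strip() for s in input_string.split(",")) if t]
--     if not tasks:
--         return "❌ Please enter at least one valid task"
--     if len(set(tasks)) != len(tasks):
--         return "⚠️ Duplicate tasks detected. Please ensure all tasks are unique."
--     if len(tasks) > len(time_domains):
--         return "❌ Not enough time slots for tasks"
--     formatted = "\n".join(f"{task}: {slot}" for task, slot in zip(tasks, time_domains))
--     return f"✅ Valid Schedule:\n{formatted}"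
-- ===== Notes on version B (the rewrite author's own statement) =====
-- stated objective: simpler
-- what changed: Replaces the itertools.product search for the first all-distinct assignment (and the dict built from it) by directly zipping tasks with the first len(tasks) time slots, which is exactly the lexicographically-first all-distinct assignment; the unreachable fallback branch disappears.
import Mathlib
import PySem

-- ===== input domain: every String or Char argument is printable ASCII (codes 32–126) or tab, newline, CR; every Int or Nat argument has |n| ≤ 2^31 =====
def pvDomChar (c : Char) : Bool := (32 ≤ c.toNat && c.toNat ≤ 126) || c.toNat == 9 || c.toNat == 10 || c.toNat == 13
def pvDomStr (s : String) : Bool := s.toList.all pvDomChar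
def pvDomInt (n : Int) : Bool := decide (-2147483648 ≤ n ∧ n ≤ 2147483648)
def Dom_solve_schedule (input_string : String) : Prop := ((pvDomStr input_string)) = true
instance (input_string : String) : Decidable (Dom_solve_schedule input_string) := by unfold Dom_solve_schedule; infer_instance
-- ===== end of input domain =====

-- B replaces A's itertools.product search for the first all-distinct assignment by a direct
-- zip of the tasks with the first time slots (objective: simpler).

-- ===== PORT A =====
def pvTimeDomains : List String := ["Morning", "Afternoon", "Evening", "Night"]

-- itertools.product(time_domains, repeat=n): tuples in Python's order (leftmost varies slowest)
def pvProd : Nat → List (List String)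
  | 0 => [[]]
  | n + 1 => pvTimeDomains.flatMap (fun d => (pvProd n).map (fun a => d :: a))

-- s.split(","): PySem.Str.split? is none only for sep = "", so .getD [] is exact here
def solve_schedule (input_string : String) : String :=
  let tasks := (((PySem.Str.split? input_string ",").getD []).map (fun t => PySem.Str.strip t)).filter
      (fun t => decide (t ≠ ""))
  if tasks = [] then "❌ Please enter at least one valid task"
  else if (PySem.Set.ofList tasks).length ≠ tasks.length then
    "⚠️ Duplicate tasks detected. Please ensure all tasks are unique."
  else if tasks.length > pvTimeDomains.length then "❌ Not enough time slots for tasks"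
  else
    match (pvProd tasks.length).find? (fun a => (PySem.Set.ofList a).length == a.length) with
    | some assignment =>
        let task_map : PySem.Dict String String := PySem.Dict.ofList (tasks.zip assignment)
        let formatted := PySem.Str.join "\n" (task_map.items.map (fun p => p.1 ++ ": " ++ p.2))
        "✅ Valid Schedule:\n" ++ formatted
    | none => "❌ No valid schedule found. Please adjust your tasks or time slots."

-- ===== PORT B =====
def solve_schedule_alt (input_string : String) : String :=
  let tasks := ((PySem.Str.split? input_string ",").getD []).filterMap (fun s =>
      let t := PySem.Str.strip s; if t = "" then none else some t)
  if tasks = [] then "❌ Please enter at least one valid task"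
  else if (PySem.Set.ofList tasks).length ≠ tasks.length then
    "⚠️ Duplicate tasks detected. Please ensure all tasks are unique."
  else if tasks.length > pvTimeDomains.length then "❌ Not enough time slots for tasks"
  else
    "✅ Valid Schedule:\n" ++
      PySem.Str.join "\n" ((tasks.zip pvTimeDomains).map (fun p => p.1 ++ ": " ++ p.2))

-- ===== PRECONDITION & SPEC =====
def Spec_solve_schedule (input_string : String) (out : String) : Prop := out = solve_schedule_alt input_string
instance (input_string : String) (out : String) : Decidable (Spec_solve_schedule input_string out) := by unfold Spec_solve_schedule; infer_instance

-- ===== CLAIM (what is proved, stated in full; the proofs are below) =====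
def Claim_equal_solve_schedule : Prop := ∀ (input_string : String), Dom_solve_schedule input_string → Spec_solve_schedule input_string (solve_schedule input_string)

-- ===== LEMMAS AND PROOFS =====

-- B's strip-and-drop-empties genexp computes A's map-strip-then-filter list
theorem pv_tasks_alt_eq (l : List String) :
    l.filterMap (fun s => let t := PySem.Str.strip s; if t = "" then none else some t)
      = (l.map (fun t => PySem.Str.strip t)).filter (fun t => decide (t ≠ "")) := by
  induction l with
  | nil => rfl
  | cons x xs ih =>
    simp only [List.filterMap_cons, List.map_cons, List.filter_cons]
    by_cases h : PySem.Str.strip x = "" <;> simp [h, ih]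

-- len(set(xs)) == len(xs) means xs has no duplicates
theorem pv_nodup_of_ofList_length {α : Type} [BEq α] [LawfulBEq α] :
    ∀ xs : List α, (PySem.Set.ofList xs).length = xs.length → xs.Nodup := by
  intro xs
  induction xs with
  | nil => intro _; exact List.nodup_nil
  | cons x xs ih =>
    intro h
    rw [PySem.Set.ofList_cons] at h
    simp only [PySem.Set.discard, List.length_cons] at h
    have h1 : (List.filter (fun y => !(y == x)) (PySem.Set.ofList xs)).length
        ≤ (PySem.Set.ofList xs).length := List.length_filter_le _ _
    have h2 : (PySem.Set.ofList xs).length ≤ xs.length := PySem.Set.length_ofList_le _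
    have hlen : (PySem.Set.ofList xs).length = xs.length := by omega
    have hfeq : List.filter (fun y => !(y == x)) (PySem.Set.ofList xs) = PySem.Set.ofList xs :=
      List.Sublist.eq_of_length List.filter_sublist (by omega)
    have hx : x ∉ xs := by
      intro hm
      have hmo : x ∈ PySem.Set.ofList xs := (PySem.Set.mem_ofList _ _).mpr hm
      rw [← hfeq] at hmo
      simp [List.mem_filter] at hmo
    exact List.nodup_cons.mpr ⟨hx, ih hlen⟩
  
-- zipping truncates: pairing with the whole domain list equals pairing with its first n slots
theorem pv_zip_take {α β : Type} : ∀ (xs : List α) (ys : List β),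
    xs.zip (ys.take xs.length) = xs.zip ys
  | [], _ => by simp
  | _ :: _, [] => by simp
  | x :: xs, y :: ys => by simp [pv_zip_take xs ys]

-- dict(zip(tasks, assignment)) with unique tasks lists its pairs in the given order
theorem pv_items_ofList_nodup (l : List (String × String)) (h : (l.map Prod.fst).Nodup) :
    (PySem.Dict.ofList l).items = l := by
  have := PySem.Dict.items_foldl_insert_fresh (l := l) (k := Prod.fst) (v := Prod.snd)
      (d := (PySem.Dict.empty : PySem.Dict String String))
      (by intro a _; exact PySem.Dict.contains_empty _) h
  simpa [PySem.Dict.ofList, PySem.Dict.update] using this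

-- the first all-distinct tuple of itertools.product(time_domains, repeat=n) is time_domains[:n]
theorem pv_find_first (n : Nat) (h : n ≤ 4) :
    (pvProd n).find? (fun a => (PySem.Set.ofList a).length == a.length)
      = some (pvTimeDomains.take n) := by
  interval_cases n <;> decide

-- ===== VERDICT (by name: the statement is the Claim_ definition above) =====
theorem solve_schedule_spec : Claim_equal_solve_schedule := by
  intro s _
  unfold Spec_solve_schedule solve_schedule solve_schedule_alt
  rw [pv_tasks_alt_eq]
  set tasks := (((PySem.Str.split? s ",").getD []).map (fun t => PySem.Str.strip t)).filter
      (fun t => decide (t ≠ "")) with htasks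
  by_cases h1 : tasks = []
  · simp [h1]
  · rw [if_neg h1, if_neg h1]
    by_cases h2 : (PySem.Set.ofList tasks).length ≠ tasks.length
    · rw [if_pos h2, if_pos h2]
    · rw [if_neg h2, if_neg h2]
      rw [not_not] at h2
      by_cases h3 : tasks.length > pvTimeDomains.length
      · rw [if_pos h3, if_pos h3]
      · rw [if_neg h3, if_neg h3]
        have hn4 : tasks.length ≤ 4 := by
          simpa [pvTimeDomains] using h3
        rw [pv_find_first _ hn4]
        have hlt : (pvTimeDomains.take tasks.length).length = tasks.length := by
          simp [pvTimeDomains]; omega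
        have hfst : (tasks.zip (pvTimeDomains.take tasks.length)).map Prod.fst = tasks :=
          List.map_fst_zip (le_of_eq hlt.symm)
        have hnd : ((tasks.zip (pvTimeDomains.take tasks.length)).map Prod.fst).Nodup := by
          rw [hfst]; exact pv_nodup_of_ofList_length tasks h2
        show "✅ Valid Schedule:\n" ++ _ = _
        rw [pv_items_ofList_nodup _ hnd, pv_zip_take tasks pvTimeDomains]
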